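-- pv_equiv track=rewrite | github.com/oguuk/Programmers | lv3/Summer:Winter Coding(~2018) 숫자 게임.py | solution
-- ===== SOURCE A (Python) =====
-- from bisect import bisect_right as br
--
-- def solution(A, B):
--     B.sort()
--     answer = 0
--     for a in A:
--         idx = br(B,a)
--         if idx < len(B):
--             if B[idx] > a:
--                 answer+=1
--                 del B[idx]
--         else:
--             del B[0]
--     return answer
-- ===== SOURCE B (Python) =====
-- def solution(A, B):
--     # Note: the original mutates B in place (sorts it and deletes from it);
--     # this version leaves B untouched. Equivalence is about the return value.
--     pool = list(B)
--     ans = 0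
--     for a in A:
--         best = None
--         for x in pool:
--             if x > a and (best is None or x < best):
--                 best = x
--         if best is not None:
--             ans += 1
--             pool.remove(best)
--         elif pool:
--             pool.remove(min(pool))
--     return ans
-- ===== Notes on version B (the rewrite author's own statement) =====
-- stated objective: alternative
-- what changed: Replaces sort + bisect_right + positional deletion on a maintained sorted list by a single pass over an unsorted pool with a linear scan for the least value above each a and value-based removal (no sorting, no binary search); also leaves the argument B unmutated, unlike A which sorts and deletes from it in place.
import Mathlib
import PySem

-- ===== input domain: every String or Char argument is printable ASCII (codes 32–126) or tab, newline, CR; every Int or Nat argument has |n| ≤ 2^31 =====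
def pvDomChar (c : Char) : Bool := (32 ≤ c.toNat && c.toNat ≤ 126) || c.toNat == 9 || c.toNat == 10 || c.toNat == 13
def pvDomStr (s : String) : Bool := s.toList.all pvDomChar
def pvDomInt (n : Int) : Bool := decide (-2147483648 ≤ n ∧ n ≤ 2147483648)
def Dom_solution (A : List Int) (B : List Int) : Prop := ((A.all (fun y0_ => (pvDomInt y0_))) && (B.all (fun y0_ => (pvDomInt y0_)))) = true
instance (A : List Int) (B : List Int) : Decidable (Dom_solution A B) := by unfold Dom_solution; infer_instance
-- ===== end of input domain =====

-- B replaces A's sort + bisect + positional deletion by a single pass over an UNSORTED pool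
-- with a linear scan for the least value above `a` (same greedy, different data structure; same
-- O(n²) cost). A mutates its argument B in place (sorts it, deletes from it); B does not — the
-- equivalence proved here is about the return value only.

-- ===== PORT A =====
-- one loop iteration of A: idx = bisect_right(B, a); match-and-delete or delete B[0]
def solutionStep (st : List Int × Int) (a : Int) : List Int × Int :=
  let Bs := st.1
  let idx := PySem.List.bisectRight Bs a
  if idx < Bs.length then
    if a < PySem.List.pyGetD Bs (idx : Int) 0 then
      (Bs.eraseIdx idx, st.2 + 1)   -- del B[idx]: eraseIdx is exact for 0 ≤ idx < len(B)
    else st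
  else
    (Bs.tail, st.2)   -- del B[0]: tail is exact for nonempty B; on [] Python raises (outside Pre_)

def solution (A : List Int) (B : List Int) : Int :=
  (A.foldl solutionStep (PySem.List.sorted B (fun x => x) false, 0)).2

-- ===== PORT B =====
-- the inner scan of Source B: smallest element of pool strictly greater than a (None if none)
def minAbove (a : Int) (pool : List Int) : Option Int :=
  pool.foldl (fun best x =>
    match best with
    | none => if a < x then some x else none
    | some b => if a < x ∧ x < b then some x else some b) none

def solutionAltStep (st : List Int × Int) (a : Int) : List Int × Int :=
  match minAbove a st.1 with
  | some b => ((PySem.List.remove? st.1 b).getD st.1, st.2 + 1)  -- pool.remove(best); best ∈ pool always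
  | none =>
    match PySem.List.min? st.1 (fun x => x) with
    | some m => ((PySem.List.remove? st.1 m).getD st.1, st.2)    -- elif pool: pool.remove(min(pool))
    | none => st                                                  -- pool empty: skip

def solution_alt (A : List Int) (B : List Int) : Int :=
  (A.foldl solutionAltStep (B, 0)).2

-- ===== PRECONDITION & SPEC =====
-- A raises IndexError (del B[0] on an empty list) exactly when len(A) > len(B).
def Pre_solution (A : List Int) (B : List Int) : Prop := A.length ≤ B.length
instance (A : List Int) (B : List Int) : Decidable (Pre_solution A B) := by unfold Pre_solution; infer_instance
def pvWitness_solution : List Int × List Int := ([1, 5], [2, 2, 7])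

def Spec_solution (A : List Int) (B : List Int) (out : Int) : Prop := out = solution_alt A B
instance (A : List Int) (B : List Int) (out : Int) : Decidable (Spec_solution A B out) := by unfold Spec_solution; infer_instance

-- ===== CLAIM (what is proved, stated in full; the proofs are below) =====
def Claim_equal_solution : Prop := ∀ (A : List Int) (B : List Int), Dom_solution A B → Pre_solution A B → Spec_solution A B (solution A B)

-- ===== LEMMAS AND PROOFS =====

-- the state invariant: A's list is a sorted arrangement of B's pool, counts agree
def GInv (s t : List Int × Int) : Prop :=
  s.1.Pairwise (· ≤ ·) ∧ s.1.Perm t.1 ∧ s.2 = t.2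

-- characterisation of Source B's inner scan (generalised over the accumulator)
theorem minAbove_aux (a : Int) : ∀ (pool : List Int) (acc : Option Int),
    (∀ b, acc = some b → a < b) →
    (pool.foldl (fun best x =>
      match best with
      | none => if a < x then some x else none
      | some b => if a < x ∧ x < b then some x else some b) acc = none
        → acc = none ∧ ∀ x ∈ pool, x ≤ a) ∧
    (∀ c, pool.foldl (fun best x =>
      match best with
      | none => if a < x then some x else none
      | some b => if a < x ∧ x < b then some x else some b) acc = some c
        → a < c ∧ (c ∈ pool ∨ acc = some c) ∧
          (∀ x ∈ pool, a < x → c ≤ x) ∧ (∀ b, acc = some b → c ≤ b)) := by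
  intro pool
  induction pool with
  | nil =>
    intro acc hacc
    refine ⟨fun h => ⟨h, by intro x hx; simp at hx⟩, fun c h => ?_⟩
    simp only [List.foldl_nil] at h
    exact ⟨hacc c h, Or.inr h, by intro x hx; simp at hx, fun b hb => by rw [hb] at h; cases h; exact le_refl _⟩
  | cons x xs ih =>
    intro acc hacc
    simp only [List.foldl_cons]
    cases acc with
    | none =>
      by_cases hx : a < x
      · simp only [if_pos hx]
        obtain ⟨ihn, ihs⟩ := ih (some x) (fun b hb => by cases hb; exact hx)
        refine ⟨fun h => absurd (ihn h).1 (by simp), fun c h => ?_⟩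
        obtain ⟨h1, h2, h3, h4⟩ := ihs c h
        refine ⟨h1, ?_, ?_, by simp⟩
        · rcases h2 with h2 | h2
          · exact Or.inl (List.mem_cons_of_mem _ h2)
          · exact Or.inl (by cases h2; simp)
        · intro y hy hay
          rcases List.mem_cons.1 hy with hy | hy
          · cases hy; exact h4 _ rfl
          · exact h3 y hy hay
      · simp only [if_neg hx]
        obtain ⟨ihn, ihs⟩ := ih none (by simp)
        refine ⟨fun h => ?_, fun c h => ?_⟩
        · refine ⟨by simp, fun y hy => ?_⟩
          rcases List.mem_cons.1 hy with hy | hy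
          · cases hy; omega
          · exact (ihn h).2 y hy
        · obtain ⟨h1, h2, h3, _⟩ := ihs c h
          refine ⟨h1, ?_, ?_, by simp⟩
          · rcases h2 with h2 | h2
            · exact Or.inl (List.mem_cons_of_mem _ h2)
            · cases h2
          · intro y hy hay
            rcases List.mem_cons.1 hy with hy | hy
            · cases hy; omega
            · exact h3 y hy hay
    | some b0 =>
      have hab0 : a < b0 := hacc b0 rfl
      by_cases hx : a < x ∧ x < b0
      · simp only [if_pos hx]
        obtain ⟨ihn, ihs⟩ := ih (some x) (fun b hb => by cases hb; exact hx.1)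
        refine ⟨fun h => absurd (ihn h).1 (by simp), fun c h => ?_⟩
        obtain ⟨h1, h2, h3, h4⟩ := ihs c h
        have hcx : c ≤ x := by
          rcases h2 with h2 | h2
          · exact h4 x rfl
          · cases h2; exact le_refl _
        refine ⟨h1, ?_, ?_, fun b hb => by cases hb; omega⟩
        · rcases h2 with h2 | h2
          · exact Or.inl (List.mem_cons_of_mem _ h2)
          · exact Or.inl (by cases h2; simp)
        · intro y hy hay
          rcases List.mem_cons.1 hy with hy | hy
          · cases hy; exact hcx
          · exact h3 y hy hay
      · simp only [if_neg hx]
        obtain ⟨ihn, ihs⟩ := ih (some b0) hacc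
        refine ⟨fun h => absurd (ihn h).1 (by simp), fun c h => ?_⟩
        obtain ⟨h1, h2, h3, h4⟩ := ihs c h
        have hcb0 : c ≤ b0 := h4 b0 rfl
        refine ⟨h1, ?_, ?_, fun b hb => by cases hb; exact hcb0⟩
        · rcases h2 with h2 | h2
          · exact Or.inl (List.mem_cons_of_mem _ h2)
          · exact Or.inr h2
        · intro y hy hay
          rcases List.mem_cons.1 hy with hy | hy
          · cases hy; omega
          · exact h3 y hy hay

theorem minAbove_none (a : Int) (pool : List Int) :
    minAbove a pool = none → ∀ x ∈ pool, x ≤ a := by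
  intro h
  exact ((minAbove_aux a pool none (by simp)).1 h).2

theorem minAbove_some (a : Int) (pool : List Int) (c : Int) :
    minAbove a pool = some c → a < c ∧ c ∈ pool ∧ ∀ x ∈ pool, a < x → c ≤ x := by
  intro h
  obtain ⟨h1, h2, h3, _⟩ := (minAbove_aux a pool none (by simp)).2 c h
  rcases h2 with h2 | h2
  · exact ⟨h1, h2, h3⟩
  · cases h2

-- erasing the first occurrence by value = erasing by index, when earlier entries differ
theorem erase_eq_eraseIdx_of_lt : ∀ (S : List Int) (i : Nat) (_h : i < S.length),
    (∀ j (hj : j < S.length), j < i → S[j] ≠ S[i]'_h) → S.erase (S[i]'_h) = S.eraseIdx i := by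
  intro S
  induction S with
  | nil => intro i h; simp at h
  | cons x xs ih =>
    intro i h hne
    cases i with
    | zero => simp
    | succ n =>
      have hlen : n < xs.length := by simp only [List.length_cons] at h; omega
      have hx : x ≠ xs[n] := by simpa using hne 0 (by simp) (by omega)
      simp only [List.eraseIdx_cons_succ, List.getElem_cons_succ]
      rw [List.erase_cons_tail (by simpa using fun h' => hx h')]
      rw [ih n hlen (by
        intro j hj hjn
        have := hne (j+1) (by simp only [List.length_cons]; omega) (by omega)
        simpa using this)]

-- one step of A matches one step of B
theorem step_inv (a : Int) (s t : List Int × Int) (hInv : GInv s t) :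
    GInv (solutionStep s a) (solutionAltStep t a) := by
  obtain ⟨hsort, hperm, hcnt⟩ := hInv
  obtain ⟨S, n⟩ := s
  obtain ⟨pool, m⟩ := t
  simp only at hsort hperm hcnt
  obtain ⟨spec1, spec2, spec3⟩ := PySem.List.bisectRight_spec S a hsort
  by_cases hlt : PySem.List.bisectRight S a < S.length
  · -- A matches S[idx], the smallest element above a; so does B's scan
    have hgt : a < S[PySem.List.bisectRight S a] := spec3 _ hlt (le_refl _)
    have hSidx_mem : S[PySem.List.bisectRight S a] ∈ pool :=
      hperm.mem_iff.1 (List.getElem_mem hlt)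
    have hmin : minAbove a pool = some (S[PySem.List.bisectRight S a]'hlt) := by
      cases hma : minAbove a pool with
      | none => exact absurd (minAbove_none a pool hma _ hSidx_mem) (by omega)
      | some c =>
        obtain ⟨hc1, hc2, hc3⟩ := minAbove_some a pool c hma
        obtain ⟨j, hj, hjc⟩ := List.mem_iff_getElem.1 (hperm.symm.mem_iff.1 hc2)
        have hji : PySem.List.bisectRight S a ≤ j := by
          by_contra hlt'
          have := spec2 j hj (by omega)
          omega
        have h1 : S[PySem.List.bisectRight S a] ≤ c := by
          rw [← hjc]
          rcases Nat.eq_or_lt_of_le hji with h | h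
          · subst h; exact le_refl _
          · exact List.pairwise_iff_getElem.1 hsort _ j hlt hj h
        have h2 : c ≤ S[PySem.List.bisectRight S a] := hc3 _ hSidx_mem hgt
        congr 1
        omega
    have herase : S.erase (S[PySem.List.bisectRight S a]'hlt)
        = S.eraseIdx (PySem.List.bisectRight S a) := by
      refine erase_eq_eraseIdx_of_lt S _ hlt ?_
      intro j hj hji
      have := spec2 j hj hji
      omega
    have hrem : PySem.List.remove? pool (S[PySem.List.bisectRight S a]'hlt)
        = some (pool.erase (S[PySem.List.bisectRight S a]'hlt)) :=
      PySem.List.remove?_eq_some_erase pool _ hSidx_mem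
    simp only [solutionStep, solutionAltStep, hmin, hrem, if_pos hlt,
      PySem.List.pyGetD_natCast, List.getD_eq_getElem?_getD, List.getElem?_eq_getElem hlt,
      Option.getD_some, if_pos hgt]
    refine ⟨hsort.sublist (List.eraseIdx_sublist S _), ?_, by simp [hcnt]⟩
    rw [← herase]
    exact List.Perm.erase _ hperm
  · -- nothing in S (hence in pool) is above a: A drops B[0], B drops min(pool)
    have hall : ∀ x ∈ pool, x ≤ a := by
      intro x hx
      obtain ⟨j, hj, hjx⟩ := List.mem_iff_getElem.1 (hperm.symm.mem_iff.1 hx)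
      have := spec2 j hj (by omega)
      omega
    have hma : minAbove a pool = none := by
      cases hma : minAbove a pool with
      | none => rfl
      | some c =>
        obtain ⟨hc1, hc2, _⟩ := minAbove_some a pool c hma
        exact absurd (hall c hc2) (by omega)
    cases hS : S with
    | nil =>
      subst hS
      have hpool : pool = [] := (List.Perm.nil_eq hperm).symm
      subst hpool
      simp [GInv, solutionStep, solutionAltStep, minAbove, PySem.List.min?, hcnt]
    | cons h0 T =>
      subst hS
      have hpoolne : pool ≠ [] := by
        intro hp
        rw [hp] at hperm
        simp at hperm
      cases hmn : PySem.List.min? pool (fun x => x) with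
      | none => rw [PySem.List.min?_eq_none_iff] at hmn; exact absurd hmn hpoolne
      | some mn =>
        have hmn_mem : mn ∈ pool := PySem.List.min?_mem hmn
        have hmn_min : ∀ y ∈ pool, mn ≤ y := fun y hy => by
          simpa using PySem.List.min?_isMin hmn y hy
        have hmem0 : h0 ∈ pool := hperm.mem_iff.1 (by simp)
        have hh0_min : ∀ y ∈ pool, h0 ≤ y := by
          intro y hy
          obtain ⟨j, hj, hjy⟩ := List.mem_iff_getElem.1 (hperm.symm.mem_iff.1 hy)
          subst hjy
          cases j with
          | zero => simp
          | succ k =>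
            have := List.pairwise_iff_getElem.1 hsort 0 (k+1) (by simp) hj (by omega)
            simpa using this
        have hmneq : mn = h0 := le_antisymm (hmn_min h0 hmem0) (hh0_min mn hmn_mem)
        have herase : (pool.erase mn).Perm T := by
          rw [hmneq]
          have h' : ((h0 :: T).erase h0).Perm (pool.erase h0) := List.Perm.erase h0 hperm
          rw [List.erase_cons_head] at h'
          exact h'.symm
        have hrem : PySem.List.remove? pool mn = some (pool.erase mn) :=
          PySem.List.remove?_eq_some_erase pool _ hmn_mem
        simp only [solutionStep, solutionAltStep, hma, if_neg hlt, hmn, hrem,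
          Option.getD_some, List.tail_cons]
        exact ⟨hsort.tail, herase.symm, hcnt⟩

theorem fold_inv (A : List Int) : ∀ (s t : List Int × Int), GInv s t →
    GInv (A.foldl solutionStep s) (A.foldl solutionAltStep t) := by
  induction A with
  | nil => intro s t h; simpa using h
  | cons a A ih =>
    intro s t h
    simp only [List.foldl_cons]
    exact ih _ _ (step_inv a s t h)

-- ===== VERDICT (by name: the statement is the Claim_ definition above) =====
theorem solution_spec : Claim_equal_solution := by
  intro A B _ _
  unfold Spec_solution solution solution_alt
  have h0 : GInv (PySem.List.sorted B (fun x => x) false, 0) (B, 0) :=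
    ⟨by simpa using PySem.List.sorted_pairwise B (fun x => x),
     PySem.List.sorted_perm B (fun x => x) false, rfl⟩
  exact (fold_inv A _ _ h0).2.2
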